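-- pv_equiv track=rewrite | github.com/lexrazoux/domain_selection | measures.py | get_eval_voc
-- ===== SOURCE A (Python) =====
-- def get_eval_voc(wordsa,wordsb,N):
--     n = 0
--     na = 0
--     nb = 0
--     eval_voc = []
--
--     la = len(wordsa)
--     lb = len(wordsb)
--
--     while n < min(N,len(list(set(wordsa).union(wordsb)))):
--
--         if (na <= nb or nb >= lb) and na<la:
--             if wordsa[na] not in eval_voc:
--                 eval_voc.append(wordsa[na])
--                 n = n + 1
--             na = na + 1
--
--         else:
--             if wordsb[nb] not in eval_voc:
--                 eval_voc.append(wordsb[nb])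
--                 n = n + 1
--             nb = nb + 1
--
--
--     return eval_voc, n
-- ===== SOURCE B (Python) =====
-- def get_eval_voc(wordsa, wordsb, N):
--     # Phase 1: the pick order of the original two-pointer loop is a fixed
--     # a-first positional interleave: a0,b0,a1,b1,... then the tail of the longer list.
--     merged = []
--     for x, y in zip(wordsa, wordsb):
--         merged.append(x)
--         merged.append(y)
--     m = min(len(wordsa), len(wordsb))
--     merged += wordsa[m:] + wordsb[m:]
--     # Phase 2: one dedup pass over the merged list, stopping at target.
--     target = min(N, len(set(wordsa).union(wordsb)))
--     result = []
--     seen = set()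
--     for w in merged:
--         if len(result) >= target:
--             break
--         if w not in seen:
--             seen.add(w)
--             result.append(w)
--     return result, len(result)
-- ===== Notes on version B (the rewrite author's own statement) =====
-- stated objective: faster
-- what changed: Replaces the stateful two-pointer while-loop (na/nb cursors, conditional branch choosing which list to read, a set-union rebuilt and a list membership scan every iteration) by two independent phases: build the fixed a-first positional interleave once with zip plus the leftover tails, then a single seen-set dedup pass truncated at target = min(N, len(set(wordsa).union(wordsb))).
import Mathlib
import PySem

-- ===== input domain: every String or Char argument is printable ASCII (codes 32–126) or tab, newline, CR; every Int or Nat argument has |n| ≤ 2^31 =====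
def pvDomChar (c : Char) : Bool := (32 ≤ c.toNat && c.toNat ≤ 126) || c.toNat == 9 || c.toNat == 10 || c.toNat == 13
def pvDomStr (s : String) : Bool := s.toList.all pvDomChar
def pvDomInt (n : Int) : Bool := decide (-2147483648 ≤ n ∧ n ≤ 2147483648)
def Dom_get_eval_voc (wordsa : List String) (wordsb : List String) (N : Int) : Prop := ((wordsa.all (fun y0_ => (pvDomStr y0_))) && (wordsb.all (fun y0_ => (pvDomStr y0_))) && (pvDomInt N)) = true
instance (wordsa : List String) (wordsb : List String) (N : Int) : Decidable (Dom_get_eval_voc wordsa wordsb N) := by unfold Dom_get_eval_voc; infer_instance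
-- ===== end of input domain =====

-- B replaces A's stateful two-pointer while-loop by two independent phases (build the
-- positional interleave once, then one truncated seen-set dedup pass); B builds the union
-- set once instead of every iteration and was measured faster in a timing run.

-- ===== PORT A =====
-- A's while-loop: state (n, na, nb, eval_voc); the while condition recomputes
-- min(N, len(list(set(wordsa).union(wordsb)))) each iteration, as the Python does
-- (only the length of that set is used, so hash iteration order is irrelevant).
-- The 'none' branch is Python's IndexError on wordsb[nb]; it is unreachable from the
-- initial state (the loop stops before both lists are exhausted), so A is total.
def pvLoopA (wordsa wordsb : List String) (N : Int) (n : Int) (na nb : Nat) (voc : List String) : List String × Int :=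
  if n < min N (PySem.Set.len (PySem.Set.union (PySem.Set.ofList wordsa) wordsb)) then
    if h : (na ≤ nb ∨ wordsb.length ≤ nb) ∧ na < wordsa.length then
      if wordsa[na]'h.2 ∉ voc then
        pvLoopA wordsa wordsb N (n + 1) (na + 1) nb (voc ++ [wordsa[na]'h.2])
      else
        pvLoopA wordsa wordsb N n (na + 1) nb voc
    else
      match hw : wordsb[nb]? with
      | some w =>
        if w ∉ voc then
          pvLoopA wordsa wordsb N (n + 1) na (nb + 1) (voc ++ [w])
        else
          pvLoopA wordsa wordsb N n na (nb + 1) voc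
      | none => (voc, n)
  else (voc, n)
termination_by (wordsa.length - na) + (wordsb.length - nb)
decreasing_by
  · omega
  · omega
  · have h3 := (List.getElem?_eq_some_iff.mp hw).1
    omega
  · have h3 := (List.getElem?_eq_some_iff.mp hw).1
    omega

def get_eval_voc (wordsa : List String) (wordsb : List String) (N : Int) : List String × Int :=
  pvLoopA wordsa wordsb N 0 0 0 []

-- ===== PORT B =====
-- Phase 1 of Source B: merged = [x, y for each zipped pair] ++ wordsa[m:] ++ wordsb[m:]
def pvMergeB (wordsa wordsb : List String) : List String :=
  let merged := (wordsa.zip wordsb).foldl (fun acc xy => (acc ++ [xy.1]) ++ [xy.2]) []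
  let m := min wordsa.length wordsb.length
  merged ++ (PySem.List.slice wordsa (some (m : Int)) none ++ PySem.List.slice wordsb (some (m : Int)) none)

-- Phase 2 of Source B: for w in merged: break at target, append unseen words.
def pvDedupB (target : Int) : List String → List String → PySem.Set String → List String
  | [], result, _ => result
  | w :: rest, result, seen =>
    if (result.length : Int) ≥ target then result
    else if PySem.Set.contains seen w then pvDedupB target rest result seen
    else pvDedupB target rest (result ++ [w]) (PySem.Set.add seen w)

def get_eval_voc_alt (wordsa : List String) (wordsb : List String) (N : Int) : List String × Int :=
  let merged := pvMergeB wordsa wordsb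
  let target := min N (PySem.Set.len (PySem.Set.union (PySem.Set.ofList wordsa) wordsb))
  let result := pvDedupB target merged [] PySem.Set.empty
  (result, (result.length : Int))

-- ===== PRECONDITION & SPEC =====
def Spec_get_eval_voc (wordsa : List String) (wordsb : List String) (N : Int) (out : List String × Int) : Prop := out = get_eval_voc_alt wordsa wordsb N
instance (wordsa : List String) (wordsb : List String) (N : Int) (out : List String × Int) : Decidable (Spec_get_eval_voc wordsa wordsb N out) := by unfold Spec_get_eval_voc; infer_instance

-- ===== CLAIM (what is proved, stated in full; the proofs are below) =====
def Claim_equal_get_eval_voc : Prop := ∀ (wordsa : List String) (wordsb : List String) (N : Int), Dom_get_eval_voc wordsa wordsb N → Spec_get_eval_voc wordsa wordsb N (get_eval_voc wordsa wordsb N)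

-- ===== LEMMAS AND PROOFS =====

-- The a-first positional interleave both programs consume.
def pvItl : List String → List String → List String
  | [], ys => ys
  | x :: xs, ys => x :: pvItl ys xs
termination_by xs ys => xs.length + ys.length
decreasing_by simp; omega

theorem pvItl_nil_left (ys : List String) : pvItl [] ys = ys := by rw [pvItl]

theorem pvItl_cons (x : String) (xs ys : List String) :
    pvItl (x :: xs) ys = x :: pvItl ys xs := by rw [pvItl]

theorem pvItl_nil_right (xs : List String) : pvItl xs [] = xs := by
  cases xs with
  | nil => rw [pvItl]
  | cons x xs => rw [pvItl_cons, pvItl_nil_left]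

-- The tail of the interleave still to be consumed by A's loop at state (na, nb).
def pvStream (a b : List String) (na nb : Nat) : List String :=
  if a.length ≤ na then b.drop nb
  else if b.length ≤ nb then a.drop na
  else if na ≤ nb then pvItl (a.drop na) (b.drop nb)
  else pvItl (b.drop nb) (a.drop na)

-- Common reference: greedy first-occurrence dedup of a stream, truncated at length t.
def pvPick (t : Int) : List String → List String → List String
  | voc, [] => voc
  | voc, w :: ws =>
    if (voc.length : Int) ≥ t then voc
    else if w ∈ voc then pvPick t voc ws
    else pvPick t (voc ++ [w]) ws

theorem pvPick_of_ge (t : Int) (voc s : List String) (h : (voc.length : Int) ≥ t) :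
    pvPick t voc s = voc := by
  cases s <;> simp [pvPick, h]

-- A's loop-state invariant (arithmetic over the four counters).
def pvInv (a b : List String) (na nb : Nat) : Prop :=
  na ≤ a.length ∧ nb ≤ b.length ∧
    (na = nb ∨ na = nb + 1 ∨ (na = a.length ∧ a.length ≤ nb) ∨ (nb = b.length ∧ nb ≤ na))

theorem pvStream_succ_a (a b : List String) (na nb : Nat)
    (_hb : nb ≤ b.length)
    (hD : na = nb ∨ na = nb + 1 ∨ (na = a.length ∧ a.length ≤ nb) ∨ (nb = b.length ∧ nb ≤ na))
    (hC : na ≤ nb ∨ b.length ≤ nb) (hla : na < a.length) :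
    pvStream a b na nb = (a[na]'hla) :: pvStream a b (na + 1) nb := by
  have hb := _hb
  have hdropa : a.drop na = (a[na]'hla) :: a.drop (na + 1) := List.drop_eq_getElem_cons hla
  by_cases hlb : b.length ≤ nb
  · -- b exhausted: only the tail of a remains
    unfold pvStream
    rw [if_neg (by omega), if_pos hlb, hdropa]
    by_cases hend : a.length ≤ na + 1
    · rw [if_pos hend]
      have h1 : a.drop (na + 1) = [] := List.drop_of_length_le hend
      have h2 : b.drop nb = [] := List.drop_of_length_le hlb
      rw [h1, h2]
    · rw [if_neg hend, if_pos hlb]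
  · -- both alive: na = nb, the head is a[na]
    have hna : na = nb := by omega
    unfold pvStream
    rw [if_neg (by omega), if_neg hlb, if_pos (by omega), hdropa, pvItl_cons]
    by_cases hend : a.length ≤ na + 1
    · rw [if_pos hend]
      have h1 : a.drop (na + 1) = [] := List.drop_of_length_le hend
      rw [h1, pvItl_nil_right]
    · rw [if_neg hend, if_neg hlb, if_neg (by omega)]

theorem pvStream_succ_b (a b : List String) (na nb : Nat)
    (_ha : na ≤ a.length)
    (hD : na = nb ∨ na = nb + 1 ∨ (na = a.length ∧ a.length ≤ nb) ∨ (nb = b.length ∧ nb ≤ na))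
    (hNC : (nb < na ∧ na ≤ a.length) ∨ a.length ≤ na) (hlb : nb < b.length) :
    pvStream a b na nb = (b[nb]'hlb) :: pvStream a b na (nb + 1) := by
  have hdropb : b.drop nb = (b[nb]'hlb) :: b.drop (nb + 1) := List.drop_eq_getElem_cons hlb
  by_cases hla : a.length ≤ na
  · -- a exhausted
    unfold pvStream
    rw [if_pos hla, if_pos hla, hdropb]
  · -- both alive: na = nb + 1, the head is b[nb]
    have hna : na = nb + 1 := by omega
    unfold pvStream
    rw [if_neg hla, if_neg (by omega), if_neg (by omega), hdropb, pvItl_cons]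
    by_cases hend : b.length ≤ nb + 1
    · rw [if_neg hla, if_pos hend]
      have h1 : b.drop (nb + 1) = [] := List.drop_of_length_le hend
      rw [h1, pvItl_nil_right]
    · rw [if_neg hla, if_neg hend, if_pos (by omega)]

-- Main A-side lemma: from any invariant state, A's loop computes the truncated dedup
-- of the remaining interleave, and its counter n equals the vocabulary's length.
theorem pvLoopA_eq (a b : List String) (N : Int) :
    ∀ (k na nb : Nat) (voc : List String),
      (a.length - na) + (b.length - nb) ≤ k → pvInv a b na nb →
      pvLoopA a b N (voc.length : Int) na nb voc =
        (pvPick (min N (PySem.Set.len (PySem.Set.union (PySem.Set.ofList a) b))) voc (pvStream a b na nb),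
         ((pvPick (min N (PySem.Set.len (PySem.Set.union (PySem.Set.ofList a) b))) voc (pvStream a b na nb)).length : Int)) := by
  intro k
  induction k with
  | zero =>
    intro na nb voc hk hInv
    obtain ⟨ha, hb, hD⟩ := hInv
    have hna : na = a.length := by omega
    have hnb : nb = b.length := by omega
    have hstream : pvStream a b na nb = [] := by
      unfold pvStream
      rw [if_pos (by omega)]
      exact List.drop_of_length_le (by omega)
    rw [pvLoopA, hstream]
    by_cases hcond : (voc.length : Int) < min N (PySem.Set.len (PySem.Set.union (PySem.Set.ofList a) b))
    · rw [if_pos hcond, dif_neg (by omega)]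
      have hw : b[nb]? = none := List.getElem?_eq_none (by omega)
      split
      · next w heq => rw [hw] at heq; cases heq
      · simp [pvPick]
    · rw [if_neg hcond]; simp [pvPick]
  | succ k ih =>
    intro na nb voc hk hInv
    obtain ⟨ha, hb, hD⟩ := hInv
    rw [pvLoopA]
    by_cases hcond : (voc.length : Int) < min N (PySem.Set.len (PySem.Set.union (PySem.Set.ofList a) b))
    · rw [if_pos hcond]
      by_cases hC : (na ≤ nb ∨ b.length ≤ nb) ∧ na < a.length
      · -- take from wordsa
        rw [dif_pos hC]
        have hstream := pvStream_succ_a a b na nb hb hD hC.1 hC.2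
        have hInv' : pvInv a b (na + 1) nb := by
          refine ⟨by omega, hb, ?_⟩
          rcases hC.1 with h | h <;> omega
        rw [hstream]
        by_cases hmem : a[na]'hC.2 ∈ voc
        · rw [if_neg (by simpa using hmem)]
          rw [ih (na + 1) nb voc (by omega) hInv']
          rw [pvPick, if_neg (not_le.mpr hcond), if_pos hmem]
        · rw [if_pos (by simpa using hmem)]
          have hlen : ((voc ++ [a[na]'hC.2]).length : Int) = (voc.length : Int) + 1 := by simp
          rw [← hlen, ih (na + 1) nb (voc ++ [a[na]'hC.2]) (by omega) hInv']
          rw [pvPick, if_neg (not_le.mpr hcond), if_neg hmem]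
      · -- take from wordsb
        rw [dif_neg hC]
        by_cases hlb : nb < b.length
        · have hw : b[nb]? = some (b[nb]'hlb) := List.getElem?_eq_some_iff.mpr ⟨hlb, rfl⟩
          have hNC : (nb < na ∧ na ≤ a.length) ∨ a.length ≤ na := by
            rcases hD with h | h | h | h <;> omega
          have hstream := pvStream_succ_b a b na nb ha hD hNC hlb
          have hInv' : pvInv a b na (nb + 1) := by
            refine ⟨ha, by omega, ?_⟩
            rcases hD with h | h | h | h <;> omega
          rw [hstream]
          split
          · next w heq =>
            rw [hw] at heq
            injection heq with heq'
            subst heq'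
            by_cases hmem : b[nb]'hlb ∈ voc
            · rw [if_neg (by simpa using hmem)]
              rw [ih na (nb + 1) voc (by omega) hInv']
              rw [pvPick, if_neg (not_le.mpr hcond), if_pos hmem]
            · rw [if_pos (by simpa using hmem)]
              have hlen : ((voc ++ [b[nb]'hlb]).length : Int) = (voc.length : Int) + 1 := by simp
              rw [← hlen, ih na (nb + 1) (voc ++ [b[nb]'hlb]) (by omega) hInv']
              rw [pvPick, if_neg (not_le.mpr hcond), if_neg hmem]
          · next heq => rw [hw] at heq; cases heq
        · -- both lists exhausted here: the remaining stream is empty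
          have hw : b[nb]? = none := List.getElem?_eq_none (by omega)
          have hla : a.length ≤ na := by
            by_contra h
            exact hC ⟨Or.inr (by omega), by omega⟩
          have hstream : pvStream a b na nb = [] := by
            unfold pvStream
            rw [if_pos hla]
            exact List.drop_of_length_le (by omega)
          rw [hstream]
          split
          · next w heq => rw [hw] at heq; cases heq
          · simp [pvPick]
    · rw [if_neg hcond, pvPick_of_ge _ _ _ (not_lt.mp hcond)]

-- B-side: the dedup pass with a seen-set is pvPick, given seen ≡ members of result.
theorem pvDedupB_eq (t : Int) :
    ∀ (ws result : List String) (seen : PySem.Set String),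
      (∀ x, x ∈ seen ↔ x ∈ result) →
      pvDedupB t ws result seen = pvPick t result ws := by
  intro ws
  induction ws with
  | nil => intro result seen _; rfl
  | cons w rest ih =>
    intro result seen hs
    rw [pvDedupB, pvPick]
    by_cases hge : (result.length : Int) ≥ t
    · rw [if_pos hge, if_pos hge]
    · rw [if_neg hge, if_neg hge]
      by_cases hmem : w ∈ result
      · rw [if_pos (by rw [PySem.Set.contains_iff]; exact (hs w).mpr hmem), if_pos hmem]
        exact ih result seen hs
      · rw [if_neg (by rw [PySem.Set.contains_iff, hs]; exact hmem), if_neg hmem]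
        refine ih (result ++ [w]) (PySem.Set.add seen w) ?_
        intro x
        rw [PySem.Set.mem_add]
        simp [hs x, or_comm]

-- Phase-1 fold over the zip, with the accumulator pulled out.
theorem pvFoldAcc (l : List (String × String)) :
    ∀ (acc : List String),
      l.foldl (fun acc xy => (acc ++ [xy.1]) ++ [xy.2]) acc
        = acc ++ l.foldl (fun acc xy => (acc ++ [xy.1]) ++ [xy.2]) [] := by
  induction l with
  | nil => simp
  | cons p l ih =>
    intro acc
    simp only [List.foldl_cons]
    rw [ih ((acc ++ [p.1]) ++ [p.2]), ih (([] ++ [p.1]) ++ [p.2])]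
    simp

theorem pvMergeB_nil_left (b : List String) : pvMergeB [] b = b := by
  unfold pvMergeB
  dsimp only
  rw [PySem.List.slice_from_natCast, PySem.List.slice_from_natCast]
  simp

theorem pvMergeB_nil_right (a : List String) : pvMergeB a [] = a := by
  unfold pvMergeB
  dsimp only
  rw [PySem.List.slice_from_natCast, PySem.List.slice_from_natCast]
  simp

theorem pvMergeB_cons (x y : String) (xs ys : List String) :
    pvMergeB (x :: xs) (y :: ys) = x :: y :: pvMergeB xs ys := by
  unfold pvMergeB
  dsimp only
  simp only [List.zip_cons_cons, List.foldl_cons, List.length_cons]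
  rw [pvFoldAcc (xs.zip ys) (([] ++ [x]) ++ [y])]
  rw [show min (xs.length + 1) (ys.length + 1) = min xs.length ys.length + 1 from by omega]
  rw [PySem.List.slice_from_natCast, PySem.List.slice_from_natCast,
      PySem.List.slice_from_natCast, PySem.List.slice_from_natCast]
  simp [List.drop_succ_cons]

-- Phase 1 of B builds exactly the interleave.
theorem pvMergeB_eq_itl : ∀ (a b : List String), pvMergeB a b = pvItl a b := by
  intro a
  induction a with
  | nil => intro b; rw [pvMergeB_nil_left, pvItl_nil_left]
  | cons x xs ih =>
    intro b
    cases b with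
    | nil => rw [pvMergeB_nil_right, pvItl_nil_right]
    | cons y ys =>
      rw [pvMergeB_cons, ih ys, pvItl_cons, pvItl_cons]

theorem pvStream_zero (a b : List String) : pvStream a b 0 0 = pvItl a b := by
  unfold pvStream
  by_cases hla : a.length ≤ 0
  · rw [if_pos hla]
    cases a with
    | nil => rw [pvItl_nil_left]; simp
    | cons x xs => simp at hla
  · rw [if_neg hla]
    by_cases hlb : b.length ≤ 0
    · rw [if_pos hlb]
      cases b with
      | nil => rw [pvItl_nil_right]; simp
      | cons y ys => simp at hlb
    · rw [if_neg hlb, if_pos (le_refl 0)]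
      simp

-- ===== VERDICT (by name: the statement is the Claim_ definition above) =====
theorem get_eval_voc_spec : Claim_equal_get_eval_voc := by
  intro wordsa wordsb N _
  unfold Spec_get_eval_voc
  show get_eval_voc wordsa wordsb N = get_eval_voc_alt wordsa wordsb N
  unfold get_eval_voc get_eval_voc_alt
  have hA := pvLoopA_eq wordsa wordsb N (wordsa.length + wordsb.length) 0 0 []
    (by omega) ⟨by omega, by omega, Or.inl rfl⟩
  simp only [List.length_nil, Nat.cast_zero] at hA
  dsimp only
  rw [hA, pvStream_zero, pvMergeB_eq_itl]
  have hB := pvDedupB_eq (min N (PySem.Set.len (PySem.Set.union (PySem.Set.ofList wordsa) wordsb)))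
    (pvItl wordsa wordsb) [] PySem.Set.empty (by intro x; simp [PySem.Set.empty])
  rw [hB]
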